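-- pv_equiv track=rewrite | github.com/zhumengyu2002/eight-puzzle-solver | utils.py | create_goal_board
-- ===== SOURCE A (Python) =====
-- def create_goal_board(size=3):
--     """创建目标状态棋盘"""
--     board = []
--     num = 1
--     for i in range(size):
--         row = []
--         for j in range(size):
--             if i == size - 1 and j == size - 1:
--                 row.append(0)  # 最后一个位置是空白格
--             else:
--                 row.append(num)
--                 num += 1
--         board.append(row)
--     return board
-- ===== SOURCE B (Python) =====
-- def create_goal_board(size=3):
--     """创建目标状态棋盘"""
--     n = max(size, 0)
--     flat = list(range(1, n * n)) + [0]
--     return [flat[i * n:(i + 1) * n] for i in range(n)]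
-- ===== Notes on version B (the rewrite author's own statement) =====
-- stated objective: simpler
-- what changed: Replaces the nested loop with a running counter and a per-cell last-position branch by a two-phase build: one flat sequence of the tile numbers followed by the blank, then reshaped into rows by slicing.
import Mathlib
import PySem

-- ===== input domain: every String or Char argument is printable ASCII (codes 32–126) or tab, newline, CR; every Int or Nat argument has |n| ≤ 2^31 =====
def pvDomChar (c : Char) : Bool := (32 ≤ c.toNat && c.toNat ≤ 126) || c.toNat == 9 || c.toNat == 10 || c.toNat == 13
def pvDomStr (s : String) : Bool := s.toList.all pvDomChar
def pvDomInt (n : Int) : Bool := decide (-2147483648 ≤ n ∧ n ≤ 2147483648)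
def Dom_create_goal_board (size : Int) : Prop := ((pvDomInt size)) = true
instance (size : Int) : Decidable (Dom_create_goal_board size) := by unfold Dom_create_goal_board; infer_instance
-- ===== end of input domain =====

-- B replaces A's nested loop with a counter and per-cell blank branch by a two-phase
-- build (one flat sequence of tile numbers followed by the blank, then reshaped into rows by slicing): simpler.


-- ===== PORT A =====
def create_goal_board (size : Int) : List (List Int) :=
  ((PySem.List.pyRange 0 size 1).foldl
    (fun (st : List (List Int) × Int) i =>
      let inner := (PySem.List.pyRange 0 size 1).foldl
        (fun (st2 : List Int × Int) j =>
          if i = size - 1 ∧ j = size - 1 then (st2.1 ++ [0], st2.2)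
          else (st2.1 ++ [st2.2], st2.2 + 1))
        ([], st.2)
      (st.1 ++ [inner.1], inner.2))
    ([], 1)).1

-- ===== PORT B =====
def create_goal_board_alt (size : Int) : List (List Int) :=
  let n := max size 0
  let flat := PySem.List.pyRange 1 (n * n) 1 ++ [0]
  (PySem.List.pyRange 0 n 1).map
    (fun i => PySem.List.slice flat (some (i * n)) (some ((i + 1) * n)))

-- ===== PRECONDITION & SPEC =====
def Spec_create_goal_board (size : Int) (out : List (List Int)) : Prop := out = create_goal_board_alt size
instance (size : Int) (out : List (List Int)) : Decidable (Spec_create_goal_board size out) := by unfold Spec_create_goal_board; infer_instance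

-- ===== CLAIM (what is proved, stated in full; the proofs are below) =====
def Claim_equal_create_goal_board : Prop := ∀ (size : Int), Dom_create_goal_board size → Spec_create_goal_board size (create_goal_board size)

-- ===== LEMMAS AND PROOFS =====

-- the common explicit form: row i of the goal board
def pvRowSpec (size i : Int) : List Int :=
  if i = size - 1 then PySem.List.pyRange (i * size + 1) (i * size + size) 1 ++ [0]
  else PySem.List.pyRange (i * size + 1) (i * size + size + 1) 1

-- A's inner loop, over indices where the blank branch never fires, collects num, num+1, …
theorem pv_fold_cond_collect (size i : Int) (L : List Int)
    (h : ∀ x ∈ L, ¬(i = size - 1 ∧ x = size - 1)) :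
    ∀ (acc : List Int) (num : Int),
      L.foldl (fun (st2 : List Int × Int) j =>
          if i = size - 1 ∧ j = size - 1 then (st2.1 ++ [0], st2.2)
          else (st2.1 ++ [st2.2], st2.2 + 1)) (acc, num)
        = (acc ++ PySem.List.pyRange num (num + L.length) 1, num + L.length) := by
  induction L with
  | nil => intro acc num; simp [PySem.List.pyRange_one_eq_nil]
  | cons x L ih =>
    intro acc num
    simp only [List.foldl_cons, List.length_cons]
    rw [if_neg (h x (List.mem_cons_self))]
    rw [ih (fun y hy => h y (List.mem_cons_of_mem x hy))]
    push_cast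
    rw [PySem.List.pyRange_one_cons (show num < num + ((L.length : Int) + 1) by omega)]
    have h2 : num + 1 + (L.length : Int) = num + ((L.length : Int) + 1) := by ring
    rw [h2]
    simp

theorem pv_inner_else (size i num : Int) (hs : 0 ≤ size) (hi : i ≠ size - 1) :
    (PySem.List.pyRange 0 size 1).foldl
        (fun (st2 : List Int × Int) j =>
          if i = size - 1 ∧ j = size - 1 then (st2.1 ++ [0], st2.2)
          else (st2.1 ++ [st2.2], st2.2 + 1)) ([], num)
      = (PySem.List.pyRange num (num + size) 1, num + size) := by
  rw [pv_fold_cond_collect size i _ (fun x _ hc => hi hc.1)]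
  rw [show (((PySem.List.pyRange 0 size 1).length : Int)) = size by
    rw [PySem.List.length_pyRange_one]; omega]
  simp

theorem pv_inner_last (size num : Int) (hs : 0 < size) :
    (PySem.List.pyRange 0 size 1).foldl
        (fun (st2 : List Int × Int) j =>
          if size - 1 = size - 1 ∧ j = size - 1 then (st2.1 ++ [0], st2.2)
          else (st2.1 ++ [st2.2], st2.2 + 1)) ([], num)
      = (PySem.List.pyRange num (num + size - 1) 1 ++ [0], num + size - 1) := by
  have hsplit : PySem.List.pyRange 0 size 1
      = PySem.List.pyRange 0 (size - 1) 1 ++ [size - 1] := by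
    have h := PySem.List.pyRange_one_succ_right (a := 0) (b := size - 1) (by omega)
    rw [show size - 1 + 1 = size by ring] at h
    exact h
  have hpre := pv_fold_cond_collect size (size - 1) (PySem.List.pyRange 0 (size - 1) 1)
    (fun x hx hc => by
      have := (PySem.List.mem_pyRange_one.mp hx).2
      omega) [] num
  rw [show (((PySem.List.pyRange 0 (size - 1) 1).length : Int)) = size - 1 by
    rw [PySem.List.length_pyRange_one]; omega] at hpre
  rw [hsplit, List.foldl_append, hpre]
  simp only [List.foldl_cons, List.foldl_nil, and_self, ite_true]
  rw [show num + (size - 1) = num + size - 1 by ring]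
  simp

theorem pv_outer (size : Int) (hs : 0 < size) :
    ∀ (k : Nat) (m : Int) (acc : List (List Int)), 0 ≤ m → m + k = size →
      ((PySem.List.pyRange m size 1).foldl
        (fun (st : List (List Int) × Int) i =>
          (st.1 ++ [((PySem.List.pyRange 0 size 1).foldl
            (fun (st2 : List Int × Int) j =>
              if i = size - 1 ∧ j = size - 1 then (st2.1 ++ [0], st2.2)
              else (st2.1 ++ [st2.2], st2.2 + 1))
            ([], st.2)).1],
           ((PySem.List.pyRange 0 size 1).foldl
            (fun (st2 : List Int × Int) j =>
              if i = size - 1 ∧ j = size - 1 then (st2.1 ++ [0], st2.2)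
              else (st2.1 ++ [st2.2], st2.2 + 1))
            ([], st.2)).2))
        (acc, m * size + 1)).1
      = acc ++ (PySem.List.pyRange m size 1).map (pvRowSpec size) := by
  intro k
  induction k with
  | zero =>
    intro m acc _ hm
    have hnil : size ≤ m := by omega
    rw [PySem.List.pyRange_one_eq_nil hnil]
    simp
  | succ k ih =>
    intro m acc hm0 hm
    have hlt : m < size := by omega
    rw [PySem.List.pyRange_one_cons hlt]
    simp only [List.foldl_cons, List.map_cons]
    by_cases hlast : m = size - 1
    · subst hlast
      rw [pv_inner_last size ((size - 1) * size + 1) hs]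
      have hnil : size ≤ size - 1 + 1 := by omega
      rw [PySem.List.pyRange_one_eq_nil hnil]
      dsimp only
      simp only [List.foldl_nil, List.map_nil]
      unfold pvRowSpec
      rw [if_pos rfl]
      rw [show (size - 1) * size + 1 + size - 1 = (size - 1) * size + size by ring]
    · rw [pv_inner_else size m (m * size + 1) (le_of_lt hs) hlast]
      dsimp only
      rw [show m * size + 1 + size = (m + 1) * size + 1 by ring]
      rw [ih (m + 1) (acc ++ [PySem.List.pyRange (m * size + 1) ((m + 1) * size + 1) 1])
        (by omega) (by push_cast at hm ⊢; omega)]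
      unfold pvRowSpec
      rw [if_neg hlast]
      rw [show (m + 1) * size + 1 = m * size + size + 1 by ring]
      simp

theorem pv_slice_eq_rowSpec (size i : Int) (hs : 0 < size) (hi0 : 0 ≤ i) (hi : i < size) :
    PySem.List.slice (PySem.List.pyRange 1 (size * size) 1 ++ [0])
        (some (i * size)) (some ((i + 1) * size)) = pvRowSpec size i := by
  have his : i * size + 1 ≤ size * size := by nlinarith
  have h0 : (0:Int) ≤ i * size := by positivity
  rw [PySem.List.slice_toNat _ h0 (by positivity)]
  rw [PySem.List.pyRange_one_append 1 (i * size + 1) (size * size) (by omega) his]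
  rw [List.append_assoc]
  rw [List.drop_left' (by rw [PySem.List.length_pyRange_one]; omega)]
  have htake : ((i + 1) * size).toNat - (i * size).toNat = size.toNat := by
    have : (i + 1) * size = i * size + size := by ring
    omega
  rw [htake]
  unfold pvRowSpec
  by_cases hlast : i = size - 1
  · rw [if_pos hlast]
    subst hlast
    have e : size * size - ((size - 1) * size + 1) = size - 1 := by ring
    have hlen : (PySem.List.pyRange ((size - 1) * size + 1) (size * size) 1 ++ [0]).length
        ≤ size.toNat := by
      simp only [List.length_append, PySem.List.length_pyRange_one, List.length_singleton]
      omega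
    rw [List.take_of_length_le hlen]
    rw [show (size - 1) * size + size = size * size by ring]
  · rw [if_neg hlast]
    have hle : i ≤ size - 2 := by omega
    have h2 : i * size + size + 1 ≤ size * size := by
      nlinarith [mul_le_mul_of_nonneg_right hle hs.le]
    rw [PySem.List.pyRange_one_append (i * size + 1) (i * size + size + 1) (size * size)
      (by omega) h2]
    rw [List.append_assoc]
    rw [List.take_left' (by rw [PySem.List.length_pyRange_one]; omega)]

-- ===== VERDICT (by name: the statement is the Claim_ definition above) =====
theorem create_goal_board_spec : Claim_equal_create_goal_board := by
  intro size _
  unfold Spec_create_goal_board create_goal_board create_goal_board_alt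
  by_cases hs : size ≤ 0
  · rw [show max size 0 = 0 from max_eq_right hs]
    rw [PySem.List.pyRange_one_eq_nil hs]
    simp [PySem.List.pyRange_one_eq_nil (le_refl (0 : Int))]
  · replace hs : 0 < size := by omega
    rw [show max size 0 = size from max_eq_left hs.le]
    rw [List.map_congr_left (fun i hi => by
        rw [pv_slice_eq_rowSpec size i hs
          ((PySem.List.mem_pyRange_one.mp hi).1) ((PySem.List.mem_pyRange_one.mp hi).2)])]
    have h := pv_outer size hs size.toNat 0 [] le_rfl (by omega)
    rw [show (0:Int) * size + 1 = 1 by ring] at h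
    simpa using h
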